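-- pv_equiv track=rewrite | github.com/Marc-Aradillas/python-exercises | function_exercises.py | cap_first
-- ===== SOURCE A (Python) =====
-- def is_vowel(input):
--     if input in ('aeiou'):
--
--         return True
--
--     else:
--
--         return False
--
-- def is_consonant(input):
--     if is_vowel(input):
--         return False
--     else:
--         return True
--
-- def cap_first(input):
--     count = 0
--     new_string = ''
--     for letter in input:
--         if count == 0 and is_consonant(letter):
--             new_string += letter.upper()
--             count += 1
--         else:
--             new_string += letter
--             count += 1
--     return new_string
-- ===== SOURCE B (Python) =====
-- def cap_first(input):
--     if not input:
--         return input
--     if input[0] in 'aeiou':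
--         return input
--     return input[0].upper() + input[1:]
-- ===== Notes on version B (the rewrite author's own statement) =====
-- stated objective: simpler
-- what changed: Replaced the full single-pass scan with a counter by a loop-free closed form on the first character: uppercase it if it is not a lowercase vowel and concatenate the untouched rest of the string.
import Mathlib
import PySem

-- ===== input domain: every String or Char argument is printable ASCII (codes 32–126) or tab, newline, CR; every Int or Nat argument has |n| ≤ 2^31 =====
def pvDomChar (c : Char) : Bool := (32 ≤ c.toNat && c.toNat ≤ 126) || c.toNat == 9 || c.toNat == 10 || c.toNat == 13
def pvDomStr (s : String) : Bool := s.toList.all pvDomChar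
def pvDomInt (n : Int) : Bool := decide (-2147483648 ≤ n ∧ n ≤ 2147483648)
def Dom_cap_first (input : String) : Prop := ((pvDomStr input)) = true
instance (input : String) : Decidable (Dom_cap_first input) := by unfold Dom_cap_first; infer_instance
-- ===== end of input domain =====

-- B replaces A's counter-driven scan by a loop-free closed form on the first character (objective: simpler).

-- ===== PORT A =====
-- is_vowel(letter): `letter in 'aeiou'` — substring membership of the 1-char string
def pvIsVowel (c : Char) : Bool := PySem.Chars.isIn [c] ("aeiou".toList)

def pvIsConsonant (c : Char) : Bool := if pvIsVowel c then false else true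

-- the for-loop over input with state (count, new_string)
def pvStepA (st : Nat × List Char) (letter : Char) : Nat × List Char :=
  if st.1 = 0 && pvIsConsonant letter then
    (st.1 + 1, st.2 ++ [PySem.Chars.upperChar letter])
  else
    (st.1 + 1, st.2 ++ [letter])

def cap_first (input : String) : String :=
  String.ofList (input.toList.foldl pvStepA (0, [])).2

-- ===== PORT B =====
def cap_first_alt (input : String) : String :=
  match input.toList with
  | [] => input
  | c :: rest =>
    if PySem.Chars.isIn [c] ("aeiou".toList) then input
    else String.ofList (PySem.Chars.upperChar c :: rest)

-- ===== PRECONDITION & SPEC =====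
def Spec_cap_first (input : String) (out : String) : Prop := out = cap_first_alt input
instance (input : String) (out : String) : Decidable (Spec_cap_first input out) := by unfold Spec_cap_first; infer_instance

-- ===== CLAIM (what is proved, stated in full; the proofs are below) =====
def Claim_equal_cap_first : Prop := ∀ (input : String), Dom_cap_first input → Spec_cap_first input (cap_first input)

-- ===== LEMMAS AND PROOFS =====

-- after the first character, count is nonzero, so the loop copies the rest verbatim
theorem pvFoldA_pos (l : List Char) (n : Nat) (acc : List Char) :
    l.foldl pvStepA (n + 1, acc) = (n + 1 + l.length, acc ++ l) := by
  induction l generalizing n acc with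
  | nil => simp
  | cons x xs ih =>
    simp only [List.foldl_cons, pvStepA]
    rw [if_neg (by simp), ih]
    simp; omega

-- ===== VERDICT (by name: the statement is the Claim_ definition above) =====
theorem cap_first_spec : Claim_equal_cap_first := by
  intro input _
  show cap_first input = cap_first_alt input
  unfold cap_first cap_first_alt
  cases h : input.toList with
  | nil =>
    simp only [List.foldl_nil]
    conv_rhs => rw [← String.ofList_toList (s := input), h]
  | cons c rest =>
    simp only [List.foldl_cons, pvStepA, pvIsConsonant, pvIsVowel]
    by_cases hv : PySem.Chars.isIn [c] ("aeiou".toList) = true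
    · simp only [hv, if_true, Bool.and_false, Bool.false_eq_true, if_false]
      rw [show (0 : Nat) + 1 = 0 + 1 from rfl, pvFoldA_pos]
      conv_rhs => rw [← String.ofList_toList (s := input), h]
      simp
    · simp only [Bool.not_eq_true] at hv
      simp only [hv, Bool.false_eq_true, if_false, if_true, Bool.and_true, decide_true]
      rw [show (0 : Nat) + 1 = 0 + 1 from rfl, pvFoldA_pos]
      simp
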